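-- pv_equiv track=rewrite | github.com/Sujith748/coimbatore-land-engine | app.py | _cls3
-- ===== SOURCE A (Python) =====
-- def _cls3(vals, col_series, higher_is_better=False):
--     """Return CSS class for top/mid/worst value in a list of 3."""
--     if len(vals) < 2:
--         return ["compare-val-best"] * len(vals)
--     if higher_is_better:
--         sorted_v = sorted(vals, reverse=True)
--     else:
--         sorted_v = sorted(vals)
--     classes = []
--     for v in vals:
--         if v == sorted_v[0]:
--             classes.append("compare-val-best")
--         elif len(sorted_v) > 2 and v == sorted_v[-1]:
--             classes.append("compare-val-worst")
--         else:
--             classes.append("compare-val-mid")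
--     return classes
-- ===== SOURCE B (Python) =====
-- def _cls3(vals, col_series, higher_is_better=False):
--     """Return CSS class for top/mid/worst value in a list of 3."""
--     if len(vals) < 2:
--         return ["compare-val-best"] * len(vals)
--     best = max(vals) if higher_is_better else min(vals)
--     worst = min(vals) if higher_is_better else max(vals)
--     many = len(vals) > 2
--     return ["compare-val-best" if v == best
--             else "compare-val-worst" if many and v == worst
--             else "compare-val-mid"
--             for v in vals]
-- ===== Notes on version B (the rewrite author's own statement) =====
-- stated objective: simpler
-- what changed: Replaces the O(n log n) sort with direct min/max scans: best/worst values are computed once and each element is labeled by comparison, no sorted copy is built.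
import Mathlib
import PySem

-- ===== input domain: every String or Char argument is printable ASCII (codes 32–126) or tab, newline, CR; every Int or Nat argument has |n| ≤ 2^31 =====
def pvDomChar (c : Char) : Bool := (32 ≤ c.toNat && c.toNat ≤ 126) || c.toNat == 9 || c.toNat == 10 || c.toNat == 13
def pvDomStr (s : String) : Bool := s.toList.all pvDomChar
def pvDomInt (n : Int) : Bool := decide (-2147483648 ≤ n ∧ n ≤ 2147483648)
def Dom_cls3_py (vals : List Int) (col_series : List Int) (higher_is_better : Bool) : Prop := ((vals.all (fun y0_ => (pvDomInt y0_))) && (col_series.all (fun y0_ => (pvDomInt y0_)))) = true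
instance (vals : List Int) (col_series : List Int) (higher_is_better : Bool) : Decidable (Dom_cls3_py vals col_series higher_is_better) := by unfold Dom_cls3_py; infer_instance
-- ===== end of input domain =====

-- B replaces A's sort with direct min/max scans (simpler; same observable behaviour).

-- ===== PORT A =====
def cls3_py (vals : List Int) (col_series : List Int) (higher_is_better : Bool) : List String :=
  if vals.length < 2 then List.replicate vals.length "compare-val-best"
  else
    let sorted_v :=
      if higher_is_better then PySem.List.sorted vals (fun x => x) true
      else PySem.List.sorted vals (fun x => x) false
    vals.foldl (fun classes v =>
      if PySem.List.pyGet? sorted_v 0 = some v then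
        classes ++ ["compare-val-best"]
      else if 2 < sorted_v.length ∧ PySem.List.pyGet? sorted_v (-1) = some v then
        classes ++ ["compare-val-worst"]
      else
        classes ++ ["compare-val-mid"]) []

-- ===== PORT B =====
def cls3_py_alt (vals : List Int) (col_series : List Int) (higher_is_better : Bool) : List String :=
  if vals.length < 2 then List.replicate vals.length "compare-val-best"
  else
    let best := if higher_is_better then PySem.List.max? vals (fun x => x) else PySem.List.min? vals (fun x => x)
    let worst := if higher_is_better then PySem.List.min? vals (fun x => x) else PySem.List.max? vals (fun x => x)
    let many := 2 < vals.length
    vals.map (fun v =>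
      if best = some v then "compare-val-best"
      else if many ∧ worst = some v then "compare-val-worst"
      else "compare-val-mid")

-- ===== PRECONDITION & SPEC =====
def Spec_cls3_py (vals : List Int) (col_series : List Int) (higher_is_better : Bool) (out : List String) : Prop := out = cls3_py_alt vals col_series higher_is_better
instance (vals : List Int) (col_series : List Int) (higher_is_better : Bool) (out : List String) : Decidable (Spec_cls3_py vals col_series higher_is_better out) := by unfold Spec_cls3_py; infer_instance

-- ===== CLAIM (what is proved, stated in full; the proofs are below) =====
def Claim_equal_cls3_py : Prop := ∀ (vals : List Int) (col_series : List Int) (higher_is_better : Bool), Dom_cls3_py vals col_series higher_is_better → Spec_cls3_py vals col_series higher_is_better (cls3_py vals col_series higher_is_better)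

-- ===== LEMMAS AND PROOFS =====

theorem foldl_append_if_eq_map {α : Type} (f : α → String) (xs : List α) (acc : List String) :
    xs.foldl (fun classes v => classes ++ [f v]) acc = acc ++ xs.map f := by
  induction xs generalizing acc with
  | nil => simp
  | cons x t ih => simp [List.foldl, ih]

-- In a Pairwise-r list every element is the last one or related to it.
theorem pairwise_rel_getLast {α : Type} (r : α → α → Prop) :
    ∀ (ys : List α) (_ : ys.Pairwise r) (y : α) (_ : y ∈ ys) (hne : ys ≠ []),
      y = ys.getLast hne ∨ r y (ys.getLast hne) := by
  intro ys
  induction ys with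
  | nil => intro _ y hy hne; exact absurd rfl hne
  | cons a t ih =>
    intro hp y hy hne
    rcases List.pairwise_cons.mp hp with ⟨ha, ht⟩
    cases t with
    | nil =>
      simp at hy
      exact Or.inl (by simpa using hy)
    | cons b t' =>
      have hlast : (a :: b :: t').getLast hne = (b :: t').getLast (by simp) := by
        simp [List.getLast]
      rw [hlast]
      rcases List.mem_cons.mp hy with h | h
      · subst h
        exact Or.inr (ha _ (List.getLast_mem _))
      · exact ih ht y h (by simp)

-- head of sorted(vals) (ascending) is min(vals), as option values
theorem head_sorted_eq_min (vals : List Int) (hne : vals ≠ []) :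
    PySem.List.pyGet? (PySem.List.sorted vals (fun x => x) false) 0
      = PySem.List.min? vals (fun x => x) := by
  set S := PySem.List.sorted vals (fun x => x) false with hS
  have hSne : S ≠ [] := by
    intro h; exact hne ((PySem.List.sorted_eq_nil_iff _ _ _).mp h)
  obtain ⟨m, t, hmt⟩ := List.exists_cons_of_ne_nil hSne
  obtain ⟨m', hm'⟩ : ∃ m', PySem.List.min? vals (fun x => x) = some m' := by
    cases h : PySem.List.min? vals (fun x => x) with
    | none => exact absurd ((PySem.List.min?_eq_none_iff _ _).mp h) hne
    | some m' => exact ⟨m', rfl⟩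
  rw [hmt, PySem.List.pyGet?_zero_cons, hm']
  have hmin : ∀ y ∈ vals, m ≤ y := PySem.List.key_head_sorted_le vals (fun x => x) (by rw [← hS]; exact hmt)
  have hmem : m ∈ vals := (PySem.List.mem_sorted _ _ _ _).mp (hmt ▸ List.mem_cons_self)
  have hm'mem : m' ∈ vals := PySem.List.min?_mem hm'
  have hm'min : ∀ y ∈ vals, m' ≤ y := PySem.List.min?_isMin hm'
  exact congrArg some (le_antisymm (hmin m' hm'mem) (hm'min m hmem))

-- head of sorted(vals, reverse=True) is max(vals)
theorem head_sorted_rev_eq_max (vals : List Int) (hne : vals ≠ []) :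
    PySem.List.pyGet? (PySem.List.sorted vals (fun x => x) true) 0
      = PySem.List.max? vals (fun x => x) := by
  set S := PySem.List.sorted vals (fun x => x) true with hS
  have hSne : S ≠ [] := by
    intro h; exact hne ((PySem.List.sorted_eq_nil_iff _ _ _).mp h)
  obtain ⟨m, t, hmt⟩ := List.exists_cons_of_ne_nil hSne
  obtain ⟨m', hm'⟩ : ∃ m', PySem.List.max? vals (fun x => x) = some m' := by
    cases h : PySem.List.max? vals (fun x => x) with
    | none => exact absurd ((PySem.List.max?_eq_none_iff _ _).mp h) hne
    | some m' => exact ⟨m', rfl⟩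
  rw [hmt, PySem.List.pyGet?_zero_cons, hm']
  have hmax : ∀ y ∈ vals, y ≤ m := PySem.List.key_head_sorted_rev_ge vals (fun x => x) (by rw [← hS]; exact hmt)
  have hmem : m ∈ vals := (PySem.List.mem_sorted _ _ _ _).mp (hmt ▸ List.mem_cons_self)
  have hm'mem : m' ∈ vals := PySem.List.max?_mem hm'
  have hm'max : ∀ y ∈ vals, y ≤ m' := PySem.List.max?_isMax hm'
  exact congrArg some (le_antisymm (hm'max m hmem) (hmax m' hm'mem))

-- last of sorted(vals) (ascending) is max(vals)
theorem last_sorted_eq_max (vals : List Int) (hne : vals ≠ []) :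
    PySem.List.pyGet? (PySem.List.sorted vals (fun x => x) false) (-1)
      = PySem.List.max? vals (fun x => x) := by
  set S := PySem.List.sorted vals (fun x => x) false with hS
  have hSne : S ≠ [] := by
    intro h; exact hne ((PySem.List.sorted_eq_nil_iff _ _ _).mp h)
  obtain ⟨M, hM⟩ : ∃ M, PySem.List.max? vals (fun x => x) = some M := by
    cases h : PySem.List.max? vals (fun x => x) with
    | none => exact absurd ((PySem.List.max?_eq_none_iff _ _).mp h) hne
    | some M => exact ⟨M, rfl⟩
  rw [PySem.List.pyGet?_neg_one, List.getLast?_eq_some_getLast hSne, hM]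
  set L := S.getLast hSne with hL
  have hpw : S.Pairwise (fun a b => a ≤ b) := by
    simpa using PySem.List.sorted_pairwise vals (fun x => x)
  have hLge : ∀ y ∈ vals, y ≤ L := by
    intro y hy
    have hyS : y ∈ S := (PySem.List.mem_sorted _ _ _ _).mpr hy
    rcases pairwise_rel_getLast _ S hpw y hyS hSne with h | h
    · exact le_of_eq h
    · exact h
  have hLmem : L ∈ vals := (PySem.List.mem_sorted _ _ _ _).mp (List.getLast_mem hSne)
  have hMmem : M ∈ vals := PySem.List.max?_mem hM
  have hMmax : ∀ y ∈ vals, y ≤ M := PySem.List.max?_isMax hM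
  exact congrArg some (le_antisymm (hMmax L hLmem) (hLge M hMmem))

-- last of sorted(vals, reverse=True) is min(vals)
theorem last_sorted_rev_eq_min (vals : List Int) (hne : vals ≠ []) :
    PySem.List.pyGet? (PySem.List.sorted vals (fun x => x) true) (-1)
      = PySem.List.min? vals (fun x => x) := by
  set S := PySem.List.sorted vals (fun x => x) true with hS
  have hSne : S ≠ [] := by
    intro h; exact hne ((PySem.List.sorted_eq_nil_iff _ _ _).mp h)
  obtain ⟨M, hM⟩ : ∃ M, PySem.List.min? vals (fun x => x) = some M := by
    cases h : PySem.List.min? vals (fun x => x) with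
    | none => exact absurd ((PySem.List.min?_eq_none_iff _ _).mp h) hne
    | some M => exact ⟨M, rfl⟩
  rw [PySem.List.pyGet?_neg_one, List.getLast?_eq_some_getLast hSne, hM]
  set L := S.getLast hSne with hL
  have hpw : S.Pairwise (fun a b => b ≤ a) := by
    simpa using PySem.List.sorted_pairwise_rev vals (fun x => x)
  have hLle : ∀ y ∈ vals, L ≤ y := by
    intro y hy
    have hyS : y ∈ S := (PySem.List.mem_sorted _ _ _ _).mpr hy
    rcases pairwise_rel_getLast _ S hpw y hyS hSne with h | h
    · exact le_of_eq h.symm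
    · exact h
  have hLmem : L ∈ vals := (PySem.List.mem_sorted _ _ _ _).mp (List.getLast_mem hSne)
  have hMmem : M ∈ vals := PySem.List.min?_mem hM
  have hMmin : ∀ y ∈ vals, M ≤ y := PySem.List.min?_isMin hM
  exact congrArg some (le_antisymm (hLle M hMmem) (hMmin L hLmem))

-- ===== VERDICT (by name: the statement is the Claim_ definition above) =====
theorem cls3_py_spec : Claim_equal_cls3_py := by
  intro vals col_series higher_is_better _
  unfold Spec_cls3_py cls3_py cls3_py_alt
  by_cases hlen : vals.length < 2
  · simp [hlen]
  · have hne : vals ≠ [] := by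
      intro h; subst h; simp at hlen
    simp only [if_neg hlen]
    cases higher_is_better with
    | false =>
      simp only [Bool.false_eq_true, reduceIte]
      rw [show (fun (classes : List String) (v : Int) =>
            if PySem.List.pyGet? (PySem.List.sorted vals (fun x => x) false) 0 = some v then
              classes ++ ["compare-val-best"]
            else if 2 < (PySem.List.sorted vals (fun x => x) false).length ∧
                PySem.List.pyGet? (PySem.List.sorted vals (fun x => x) false) (-1) = some v then
              classes ++ ["compare-val-worst"]
            else classes ++ ["compare-val-mid"])
          = (fun classes v => classes ++
              [if PySem.List.pyGet? (PySem.List.sorted vals (fun x => x) false) 0 = some v then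
                 "compare-val-best"
               else if 2 < (PySem.List.sorted vals (fun x => x) false).length ∧
                   PySem.List.pyGet? (PySem.List.sorted vals (fun x => x) false) (-1) = some v then
                 "compare-val-worst"
               else "compare-val-mid"]) from by
          funext classes v; split_ifs <;> rfl]
      rw [foldl_append_if_eq_map]
      simp only [List.nil_append]
      apply List.map_congr_left
      intro v _
      rw [head_sorted_eq_min vals hne, last_sorted_eq_max vals hne,
          PySem.List.length_sorted]
    | true =>
      simp only [reduceIte]
      rw [show (fun (classes : List String) (v : Int) =>
            if PySem.List.pyGet? (PySem.List.sorted vals (fun x => x) true) 0 = some v then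
              classes ++ ["compare-val-best"]
            else if 2 < (PySem.List.sorted vals (fun x => x) true).length ∧
                PySem.List.pyGet? (PySem.List.sorted vals (fun x => x) true) (-1) = some v then
              classes ++ ["compare-val-worst"]
            else classes ++ ["compare-val-mid"])
          = (fun classes v => classes ++
              [if PySem.List.pyGet? (PySem.List.sorted vals (fun x => x) true) 0 = some v then
                 "compare-val-best"
               else if 2 < (PySem.List.sorted vals (fun x => x) true).length ∧
                   PySem.List.pyGet? (PySem.List.sorted vals (fun x => x) true) (-1) = some v then
                 "compare-val-worst"
               else "compare-val-mid"]) from by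
          funext classes v; split_ifs <;> rfl]
      rw [foldl_append_if_eq_map]
      simp only [List.nil_append]
      apply List.map_congr_left
      intro v _
      rw [head_sorted_rev_eq_max vals hne, last_sorted_rev_eq_min vals hne,
          PySem.List.length_sorted]
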